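-- pv_equiv track=rewrite | github.com/SeoJangSeok/Baekjoon_Python | 프로그래머스/1/389478. 택배 상자 꺼내기/택배 상자 꺼내기.py | solution
-- ===== SOURCE A (Python) =====
-- def solution(n, w, num):
--     storage = []
--     height = n // w + 1
--     x = 1 # 상자 번호
--     answer = 0
--
--     # 상자 적재
--     for i in range(height):
--         row = []
--         for j in range(w):
--             if x <= n: # 마지막 상자번호 보다 작은 상자들
--                 row.append(x)
--                 x += 1
--             else:
--                 row.append(0) # 마지막 상자 이후의 공간은 0
--
--         if i % 2 == 0: # 오른쪽으로
--             storage.append(row)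
--         else: # 왼쪽으로
--             row.reverse()
--             storage.append(row)
--     # 상자 탐색
--     for i in range(len(storage)):
--         for j in range(len(storage[0])):
--             if storage[i][j] == num:
--                 d = i
--                 while d < height and storage[d][j]: # 꺼낼 상자가 있는 경우
--                     answer += 1
--                     d += 1 # 아래로
--     return answer
-- ===== SOURCE B (Python) =====
-- def solution(n, w, num):
--     # O(1): locate num's row/column arithmetically and count filled cells above by formula.
--     if w <= 0 or num < 1 or num > n:
--         return 0
--     i, c = divmod(num - 1, w)        # row of num and its offset within that row's fill order
--     j = c if i % 2 == 0 else w - 1 - c   # actual column after zigzag reversal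
--     q, r = divmod(n, w)              # rows 0..q-1 are full; the top row q holds r boxes
--     off = j if q % 2 == 0 else w - 1 - j # column j's offset in the top row's fill order
--     return (q - i) + (1 if off < r else 0)
-- ===== Notes on version B (the rewrite author's own statement) =====
-- stated objective: faster
-- what changed: A simulates the whole warehouse (builds every zigzag row, scans all cells for num, then walks the column upward); B computes num's row/column and the count of filled cells above it by closed-form floor-division arithmetic, building nothing.
import Mathlib
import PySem

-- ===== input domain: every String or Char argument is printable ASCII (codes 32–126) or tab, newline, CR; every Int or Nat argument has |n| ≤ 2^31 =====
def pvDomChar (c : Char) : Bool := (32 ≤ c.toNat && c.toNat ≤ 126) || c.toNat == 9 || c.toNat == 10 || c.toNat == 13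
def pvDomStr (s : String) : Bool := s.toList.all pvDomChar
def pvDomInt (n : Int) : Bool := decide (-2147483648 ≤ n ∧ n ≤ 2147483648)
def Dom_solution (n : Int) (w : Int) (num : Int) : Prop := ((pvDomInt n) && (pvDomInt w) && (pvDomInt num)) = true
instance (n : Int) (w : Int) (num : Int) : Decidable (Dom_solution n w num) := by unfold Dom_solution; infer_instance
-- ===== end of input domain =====

-- B replaces A's full simulation of the zigzag warehouse by O(1) floor-division arithmetic
-- (objective: faster, asymptotically — O(1) vs O(n)).

-- ===== PORT A =====
-- the 'while d < height and storage[d][j]:' loop; pyGetD's default is only hit when the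
-- short-circuited first conjunct is already false, so the condition decides as in Python
def whileA (storage : List (List Int)) (height : Int) (j : Int) (d : Int) (answer : Int) : Int :=
  if h : d < height ∧ PySem.List.pyGetD (PySem.List.pyGetD storage d []) j 0 ≠ 0 then
    whileA storage height j (d + 1) (answer + 1)
  else answer
termination_by (height - d).toNat
decreasing_by omega

def solution (n : Int) (w : Int) (num : Int) : Int :=
  let height := PySem.Int.floordiv n w + 1
  let s :=
    (PySem.List.pyRange 0 height 1).foldl
      (fun (st : List (List Int) × Int) i =>
        let rx :=
          (PySem.List.pyRange 0 w 1).foldl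
            (fun (rx : List Int × Int) _j =>
              if rx.2 ≤ n then (rx.1 ++ [rx.2], rx.2 + 1) else (rx.1 ++ [0], rx.2))
            ([], st.2)
        if PySem.Int.mod i 2 = 0 then (st.1 ++ [rx.1], rx.2)
        else (st.1 ++ [rx.1.reverse], rx.2))
      (([] : List (List Int)), (1 : Int))
  let storage := s.1
  (PySem.List.pyRange 0 (storage.length : Int) 1).foldl
    (fun answer i =>
      (PySem.List.pyRange 0 ((PySem.List.pyGetD storage 0 []).length : Int) 1).foldl
        (fun answer j =>
          if PySem.List.pyGetD (PySem.List.pyGetD storage i []) j 0 = num then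
            whileA storage height j i answer
          else answer)
        answer)
    0

-- ===== PORT B =====
def solution_alt (n : Int) (w : Int) (num : Int) : Int :=
  if w ≤ 0 ∨ num < 1 ∨ num > n then 0
  else
    let i := PySem.Int.floordiv (num - 1) w
    let c := PySem.Int.mod (num - 1) w
    let j := if PySem.Int.mod i 2 = 0 then c else w - 1 - c
    let q := PySem.Int.floordiv n w
    let r := PySem.Int.mod n w
    let off := if PySem.Int.mod q 2 = 0 then j else w - 1 - j
    (q - i) + (if off < r then 1 else 0)

-- ===== PRECONDITION & SPEC =====
-- A computes n // w, so w = 0 (ZeroDivisionError) is the only excluded input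
def Pre_solution (n : Int) (w : Int) (num : Int) : Prop := w ≠ 0
instance (n : Int) (w : Int) (num : Int) : Decidable (Pre_solution n w num) := by
  unfold Pre_solution; infer_instance
def pvWitness_solution : Int × Int × Int := (5, 2, 3)

def Spec_solution (n : Int) (w : Int) (num : Int) (out : Int) : Prop := out = solution_alt n w num
instance (n : Int) (w : Int) (num : Int) (out : Int) : Decidable (Spec_solution n w num out) := by
  unfold Spec_solution; infer_instance

-- ===== CLAIM (what is proved, stated in full; the proofs are below) =====
def Claim_equal_solution : Prop := ∀ (n : Int) (w : Int) (num : Int), Dom_solution n w num → Pre_solution n w num → Spec_solution n w num (solution n w num)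

-- ===== LEMMAS AND PROOFS =====

-- value stored at row i, offset j of the fill order (0 if the slot is past box n)
def cellV (n w i j : Int) : Int := if i * w + j + 1 ≤ n then i * w + j + 1 else 0
-- row i as filled left-to-right
def rawRow (n w i : Int) : List Int := (PySem.List.pyRange 0 w 1).map (cellV n w i)
-- row i as stored (reversed on odd rows)
def sRow (n w i : Int) : List Int := if i % 2 = 0 then rawRow n w i else (rawRow n w i).reverse
-- value at row i, physical column j
def colV (n w i j : Int) : Int := if i % 2 = 0 then cellV n w i j else cellV n w i (w - 1 - j)

lemma sum_map_zero {α : Type} (l : List α) (f : α → Int) (h : ∀ x ∈ l, f x = 0) :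
    (l.map f).sum = 0 := by
  induction l with
  | nil => simp
  | cons a t ih => simp_all

lemma sum_single (f : Int → Int) (a b x : Int) (hax : a ≤ x) (hxb : x < b)
    (h0 : ∀ y, a ≤ y → y < b → y ≠ x → f y = 0) :
    ((PySem.List.pyRange a b 1).map f).sum = f x := by
  rw [PySem.List.pyRange_one_append a x b hax hxb.le, PySem.List.pyRange_one_cons hxb]
  rw [List.map_append, List.sum_append, List.map_cons, List.sum_cons]
  rw [sum_map_zero _ f (by
        intro y hy
        have := (PySem.List.mem_pyRange_one).1 hy
        exact h0 y this.1 (by omega) (by omega)),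
      sum_map_zero _ f (by
        intro y hy
        have := (PySem.List.mem_pyRange_one).1 hy
        exact h0 y (by omega) this.2 (by omega))]
  ring

lemma foldl_keep (l : List Int) (a : Int) : l.foldl (fun a _ => a) a = a := by
  induction l generalizing a with
  | nil => rfl
  | cons x t ih => simpa using ih a

lemma foldl_const_rows (l : List Int) :
    ∀ (acc : List (List Int)) (x : Int),
      l.foldl (fun (st : List (List Int) × Int) (_ : Int) => (st.1 ++ [([] : List Int)], st.2)) (acc, x)
        = (acc ++ l.map (fun _ => ([] : List Int)), x) := by
  induction l with
  | nil => intro acc x; simp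
  | cons y t ih =>
    intro acc x
    rw [List.foldl_cons, ih (acc ++ [[]]) x]
    simp

lemma innerA (n : Int) {w : Int} (hw : 0 ≤ w) (x0 : Int) (hx : x0 ≤ n + 1) :
    (PySem.List.pyRange 0 w 1).foldl
      (fun (rx : List Int × Int) _j =>
        if rx.2 ≤ n then (rx.1 ++ [rx.2], rx.2 + 1) else (rx.1 ++ [0], rx.2)) ([], x0)
    = ((PySem.List.pyRange 0 w 1).map (fun j => if x0 + j ≤ n then x0 + j else 0),
       min (x0 + w) (n + 1)) := by
  obtain ⟨k, rfl⟩ := Int.eq_ofNat_of_zero_le hw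
  induction k with
  | zero =>
    simp [PySem.List.pyRange_one_eq_nil (le_refl (0:Int))]
    omega
  | succ m ih =>
    rw [show ((m + 1 : Nat) : Int) = (m : Int) + 1 by push_cast; ring]
    rw [PySem.List.pyRange_one_succ_right (by positivity)]
    rw [List.foldl_append, List.map_append, ih (by positivity)]
    simp only [List.foldl_cons, List.foldl_nil, List.map_cons, List.map_nil]
    by_cases h : x0 + (m : Int) ≤ n
    · rw [if_pos (show min (x0 + (m : Int)) (n + 1) ≤ n by omega), if_pos h,
          min_eq_left (show x0 + (m : Int) ≤ n + 1 by omega)]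
      rw [Prod.mk.injEq]; exact ⟨rfl, by omega⟩
    · rw [if_neg (show ¬ min (x0 + (m : Int)) (n + 1) ≤ n by omega), if_neg h]
      rw [Prod.mk.injEq]; exact ⟨rfl, by omega⟩

lemma outerA (n w : Int) (hw : 0 < w) (hn : 0 ≤ n) (k : Nat) :
    (PySem.List.pyRange 0 (k : Int) 1).foldl
      (fun (st : List (List Int) × Int) i =>
        let rx :=
          (PySem.List.pyRange 0 w 1).foldl
            (fun (rx : List Int × Int) _j =>
              if rx.2 ≤ n then (rx.1 ++ [rx.2], rx.2 + 1) else (rx.1 ++ [0], rx.2))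
            ([], st.2)
        if PySem.Int.mod i 2 = 0 then (st.1 ++ [rx.1], rx.2)
        else (st.1 ++ [rx.1.reverse], rx.2))
      (([] : List (List Int)), (1 : Int))
    = ((PySem.List.pyRange 0 (k : Int) 1).map (sRow n w), min ((k : Int) * w + 1) (n + 1)) := by
  induction k with
  | zero =>
    simp [PySem.List.pyRange_one_eq_nil (le_refl (0:Int))]
    omega
  | succ m ih =>
    rw [show ((m + 1 : Nat) : Int) = (m : Int) + 1 by push_cast; ring]
    rw [PySem.List.pyRange_one_succ_right (by positivity)]
    rw [List.foldl_append, List.map_append, ih]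
    simp only [List.foldl_cons, List.foldl_nil, List.map_cons, List.map_nil]
    have hx0 : min ((m : Int) * w + 1) (n + 1) ≤ n + 1 := by omega
    rw [innerA n hw.le _ hx0]
    have hrow : (PySem.List.pyRange 0 w 1).map
        (fun j => if min ((m : Int) * w + 1) (n + 1) + j ≤ n then min ((m : Int) * w + 1) (n + 1) + j else 0)
        = rawRow n w (m : Int) := by
      unfold rawRow
      apply List.map_congr_left
      intro j hj
      have hj' := (PySem.List.mem_pyRange_one).1 hj
      unfold cellV
      split_ifs <;> omega
    have hpar : PySem.Int.mod (m : Int) 2 = (m : Int) % 2 :=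
      PySem.Int.mod_eq_emod_of_pos (by norm_num)
    have hmin : min (min ((m : Int) * w + 1) (n + 1) + w) (n + 1)
        = min (((m : Int) + 1) * w + 1) (n + 1) := by
      have : ((m : Int) + 1) * w = (m : Int) * w + w := by ring
      omega
    simp only [hrow, hpar, hmin]
    unfold sRow
    split_ifs with h1 <;> rw [Prod.mk.injEq] <;> exact ⟨rfl, rfl⟩

lemma rawRow_reverse (n w i : Int) (hw : 0 ≤ w) :
    (rawRow n w i).reverse = (PySem.List.pyRange 0 w 1).map (fun j => cellV n w i (w - 1 - j)) := by
  apply List.ext_getElem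
  · simp [rawRow, PySem.List.length_pyRange_one]
  · intro k h1 h2
    simp only [rawRow, List.getElem_reverse, List.getElem_map, PySem.List.getElem_pyRange_one]
    simp only [List.length_map, PySem.List.length_pyRange_one] at h1 h2 ⊢
    congr 1
    push_cast
    omega

lemma sRow_length (n w i : Int) : (sRow n w i).length = w.toNat := by
  unfold sRow rawRow
  split_ifs <;> simp [PySem.List.length_pyRange_one]

lemma getD_sRow (n w i j : Int) (hw : 0 ≤ w) (hj : 0 ≤ j) (hjw : j < w) :
    PySem.List.pyGetD (sRow n w i) j 0 = colV n w i j := by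
  unfold sRow colV
  split_ifs with hpar
  · exact PySem.List.pyGetD_map_pyRange_of_nonneg _ _ _ _ hj hjw
  · rw [rawRow_reverse n w i hw]
    exact PySem.List.pyGetD_map_pyRange_of_nonneg _ _ _ _ hj hjw

lemma whileA_count (n w q r j : Int) (storage : List (List Int)) (hw : 0 < w) (hn : 0 ≤ n)
    (hq0 : 0 ≤ q) (hq : n = q * w + r) (hr0 : 0 ≤ r) (hrw : r < w) (hj : 0 ≤ j) (hjw : j < w)
    (hst : ∀ d : Int, 0 ≤ d → d < q + 1 → PySem.List.pyGetD storage d [] = sRow n w d) :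
    ∀ (m : Nat) (d a : Int), d = q - (m : Int) → 0 ≤ d →
      whileA storage (q + 1) j d a
        = a + (q - d) + (if (if q % 2 = 0 then j else w - 1 - j) < r then 1 else 0) := by
  intro m
  induction m with
  | zero =>
    intro d a hd hd0
    have hdq : d = q := by omega
    subst hdq
    have hdw : 0 ≤ d * w := mul_nonneg hd0 hw.le
    set jj := (if d % 2 = 0 then j else w - 1 - j) with hjj
    have hcol : colV n w d j = cellV n w d jj := by
      unfold colV; rw [hjj]; split_ifs <;> rfl
    have hjj0 : 0 ≤ jj ∧ jj < w := by rw [hjj]; split_ifs <;> omega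
    rw [whileA, hst d hd0 (by omega), getD_sRow n w d j hw.le hj hjw, hcol]
    unfold cellV
    by_cases hoff : jj < r
    · rw [dif_pos ⟨by omega, by rw [if_pos (by omega)]; omega⟩]
      rw [whileA, dif_neg (by omega)]
      rw [if_pos hoff]; omega
    · rw [dif_neg (by
        rw [not_and_or]; right
        simp only [ne_eq, not_not]
        rw [if_neg (by omega)])]
      rw [if_neg hoff]; omega
  | succ m ih =>
    intro d a hd hd0
    have hdq : d < q := by omega
    have hmul : (d + 1) * w ≤ q * w :=
      mul_le_mul_of_nonneg_right (by omega) hw.le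
    rw [whileA, dif_pos ?_]
    · rw [ih (d + 1) (a + 1) (by omega) (by omega)]
      omega
    · refine ⟨by omega, ?_⟩
      rw [hst d (by omega) (by omega), getD_sRow n w d j hw.le hj hjw]
      unfold colV cellV
      have h1 : d * w + w = (d + 1) * w := by ring
      have h2 : 0 ≤ d * w := mul_nonneg hd0 hw.le
      split_ifs <;> omega


def contribV (n w q r num i j : Int) : Int :=
  if colV n w i j = num then (q - i) + (if (if q % 2 = 0 then j else w - 1 - j) < r then 1 else 0)
  else 0

lemma getD_head_nilrows {A : Type} (l : List A) :
    PySem.List.pyGetD (l.map (fun _ => ([] : List Int))) 0 ([] : List Int) = [] := by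
  cases l <;> simp [PySem.List.pyGetD, PySem.List.pyGet?, PySem.List.pyIdx?]

lemma div_unique (w i i0 c jj : Int) (hw : 0 < w) (h : i * w + jj = i0 * w + c)
    (h1 : 0 ≤ jj) (h2 : jj < w) (h3 : 0 ≤ c) (h4 : c < w) : i = i0 ∧ jj = c := by
  rcases lt_trichotomy i i0 with h' | h' | h'
  · have hm := mul_le_mul_of_nonneg_right (show i + 1 ≤ i0 by omega) hw.le
    have e : (i + 1) * w = i * w + w := by ring
    omega
  · exact ⟨h', by rw [h'] at h; omega⟩
  · have hm := mul_le_mul_of_nonneg_right (show i0 + 1 ≤ i by omega) hw.le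
    have e : (i0 + 1) * w = i0 * w + w := by ring
    omega

-- ===== VERDICT (by name: the statement is the Claim_ definition above) =====
theorem solution_spec : Claim_equal_solution := by
  intro n w num _ hpre
  unfold Spec_solution
  unfold Pre_solution at hpre
  rcases lt_trichotomy w 0 with hw | hw | hw
  · -- w < 0 : every row is empty, both sides give 0
    have hr : PySem.List.pyRange 0 w 1 = [] := PySem.List.pyRange_one_eq_nil hw.le
    simp only [solution, hr, List.foldl_nil, List.reverse_nil, ite_self]
    rw [foldl_const_rows]
    simp only [List.nil_append, getD_head_nilrows, List.length_nil, Nat.cast_zero,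
               PySem.List.pyRange_one_eq_nil (le_refl (0 : Int)), List.foldl_nil]
    rw [foldl_keep]
    simp only [solution_alt]
    rw [if_pos (Or.inl hw.le)]
  · exact absurd hw hpre
  · by_cases hn : n < 0
    · -- w > 0, n < 0 : height ≤ 0, storage is empty, both sides give 0
      have hfd : PySem.Int.floordiv n w = n / w := PySem.Int.floordiv_eq_ediv_of_pos hw
      have hneg : n / w < 0 := Int.ediv_neg_of_neg_of_pos hn hw
      have hr : PySem.List.pyRange 0 (n / w + 1) 1 = [] := PySem.List.pyRange_one_eq_nil (by omega)
      simp only [solution, hfd, hr, List.foldl_nil, List.length_nil, Nat.cast_zero,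
                 PySem.List.pyRange_one_eq_nil (le_refl (0 : Int))]
      simp only [solution_alt]
      rw [if_pos (show w ≤ 0 ∨ num < 1 ∨ num > n by omega)]
    · rw [not_lt] at hn
      have hfd : PySem.Int.floordiv n w = n / w := PySem.Int.floordiv_eq_ediv_of_pos hw
      have hq0 : 0 ≤ n / w := Int.ediv_nonneg hn hw.le
      have hk : (((n / w) + 1).toNat : Int) = n / w + 1 := Int.toNat_of_nonneg (by omega)
      have houter := outerA n w hw hn ((n / w) + 1).toNat
      rw [hk] at houter
      simp only [solution, hfd]
      rw [houter]
      have hget0 : PySem.List.pyGetD ((PySem.List.pyRange 0 (n / w + 1) 1).map (sRow n w)) 0 [] = sRow n w 0 :=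
        PySem.List.pyGetD_map_pyRange_of_nonneg _ _ _ _ (le_refl 0) (by omega)
      have hkw : ((w.toNat : Int)) = w := Int.toNat_of_nonneg hw.le
      simp only [hget0, sRow_length, List.length_map, PySem.List.length_pyRange_one,
                 sub_zero, hk, hkw]
      have hr0 : 0 ≤ n % w := Int.emod_nonneg n (ne_of_gt hw)
      have hrw : n % w < w := Int.emod_lt_of_pos n hw
      have hnqr : n = (n / w) * w + n % w := by
        conv_lhs => rw [← Int.ediv_add_emod n w]
        ring
      have hst : ∀ d : Int, 0 ≤ d → d < n / w + 1 →
          PySem.List.pyGetD ((PySem.List.pyRange 0 (n / w + 1) 1).map (sRow n w)) d [] = sRow n w d :=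
        fun d h1 h2 => PySem.List.pyGetD_map_pyRange_of_nonneg _ _ _ _ h1 h2
      have hcong : ∀ (acc i : Int), i ∈ PySem.List.pyRange 0 (n / w + 1) 1 →
          (PySem.List.pyRange 0 w 1).foldl
            (fun answer j =>
              if PySem.List.pyGetD (PySem.List.pyGetD ((PySem.List.pyRange 0 (n / w + 1) 1).map (sRow n w)) i []) j 0 = num then
                whileA ((PySem.List.pyRange 0 (n / w + 1) 1).map (sRow n w)) (n / w + 1) j i answer
              else answer) acc
          = acc + ((PySem.List.pyRange 0 w 1).map (contribV n w (n / w) (n % w) num i)).sum := by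
        intro acc i hi
        obtain ⟨hi0, hi1⟩ := PySem.List.mem_pyRange_one.1 hi
        have hinner : ∀ (a j : Int), j ∈ PySem.List.pyRange 0 w 1 →
            (if PySem.List.pyGetD (PySem.List.pyGetD ((PySem.List.pyRange 0 (n / w + 1) 1).map (sRow n w)) i []) j 0 = num then
                whileA ((PySem.List.pyRange 0 (n / w + 1) 1).map (sRow n w)) (n / w + 1) j i a
              else a)
            = a + contribV n w (n / w) (n % w) num i j := by
          intro a j hj
          obtain ⟨hj0, hjw'⟩ := PySem.List.mem_pyRange_one.1 hj
          rw [hst i hi0 hi1, getD_sRow n w i j hw.le hj0 hjw']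
          unfold contribV
          by_cases hc : colV n w i j = num
          · rw [if_pos hc, if_pos hc,
                whileA_count n w (n / w) (n % w) j _ hw hn hq0 hnqr hr0 hrw hj0 hjw' hst
                  ((n / w) - i).toNat i a (by omega) hi0]
            ring
          · rw [if_neg hc, if_neg hc]; ring
        rw [PySem.List.foldl_congr_mem _ _ _ _ hinner, PySem.List.foldl_add]
      rw [PySem.List.foldl_congr_mem _ _ _ _ hcong, PySem.List.foldl_add, zero_add]
      by_cases hnum : 1 ≤ num ∧ num ≤ n
      · obtain ⟨hn1, hn2⟩ := hnum
        have hc0 : 0 ≤ (num - 1) % w := Int.emod_nonneg _ (ne_of_gt hw)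
        have hcw : (num - 1) % w < w := Int.emod_lt_of_pos _ hw
        have hic : num - 1 = ((num - 1) / w) * w + (num - 1) % w := by
          conv_lhs => rw [← Int.ediv_add_emod (num - 1) w]
          ring
        have hi00 : 0 ≤ (num - 1) / w := Int.ediv_nonneg (by omega) hw.le
        have hi0q : (num - 1) / w ≤ n / w := Int.ediv_le_ediv hw (by omega)
        have huniq : ∀ i j, 0 ≤ i → 0 ≤ j → j < w → colV n w i j = num →
            i = (num - 1) / w ∧
              j = (if ((num - 1) / w) % 2 = 0 then (num - 1) % w else w - 1 - (num - 1) % w) := by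
          intro i j hi0' hj0' hjw' hc
          set jj := if i % 2 = 0 then j else w - 1 - j with hjjd
          have hcol : colV n w i j = cellV n w i jj := by
            unfold colV; rw [hjjd]; split_ifs <;> rfl
          have hjjb : 0 ≤ jj ∧ jj < w := by rw [hjjd]; split_ifs <;> omega
          rw [hcol] at hc
          unfold cellV at hc
          have hiw : 0 ≤ i * w := mul_nonneg hi0' hw.le
          by_cases hle : i * w + jj + 1 ≤ n
          · rw [if_pos hle] at hc
            obtain ⟨hieq, hjjeq⟩ :=
              div_unique w i ((num - 1) / w) ((num - 1) % w) jj hw (by omega) hjjb.1 hjjb.2 hc0 hcw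
            refine ⟨hieq, ?_⟩
            rw [← hieq]
            rw [hjjd] at hjjeq
            split_ifs at hjjeq ⊢ <;> omega
          · rw [if_neg hle] at hc; omega
        have hval : colV n w ((num - 1) / w)
            (if ((num - 1) / w) % 2 = 0 then (num - 1) % w else w - 1 - (num - 1) % w) = num := by
          unfold colV cellV
          by_cases hp : ((num - 1) / w) % 2 = 0
          · rw [if_pos hp, if_pos hp, if_pos (by omega)]
            omega
          · rw [if_neg hp, if_neg hp,
                show w - 1 - (w - 1 - (num - 1) % w) = (num - 1) % w by omega,
                if_pos (by omega)]
            omega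
        have houtzero : ∀ y, 0 ≤ y → y < n / w + 1 → y ≠ (num - 1) / w →
            ((PySem.List.pyRange 0 w 1).map (contribV n w (n / w) (n % w) num y)).sum = 0 := by
          intro y hy0 hy1 hyne
          apply sum_map_zero
          intro j hj
          obtain ⟨hj0', hjw'⟩ := PySem.List.mem_pyRange_one.1 hj
          unfold contribV
          rw [if_neg (fun hc => hyne (huniq y j hy0 hj0' hjw' hc).1)]
        have hinzero : ∀ y, 0 ≤ y → y < w →
            y ≠ (if ((num - 1) / w) % 2 = 0 then (num - 1) % w else w - 1 - (num - 1) % w) →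
            contribV n w (n / w) (n % w) num ((num - 1) / w) y = 0 := by
          intro y hy0 hy1 hyne
          unfold contribV
          rw [if_neg (fun hc => hyne (huniq _ y hi00 hy0 hy1 hc).2)]
        rw [sum_single _ 0 (n / w + 1) ((num - 1) / w) hi00 (by omega) houtzero,
            sum_single _ 0 w (if ((num - 1) / w) % 2 = 0 then (num - 1) % w else w - 1 - (num - 1) % w)
              (by split_ifs <;> omega) (by split_ifs <;> omega) hinzero]
        unfold contribV
        rw [if_pos hval]
        simp only [solution_alt]
        rw [if_neg (show ¬ (w ≤ 0 ∨ num < 1 ∨ num > n) by omega)]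
        simp only [PySem.Int.floordiv_eq_ediv_of_pos hw, PySem.Int.mod_eq_emod_of_pos hw,
                   PySem.Int.mod_eq_emod_of_pos (show (0 : Int) < 2 by norm_num)]
      · have hz : ((PySem.List.pyRange 0 (n / w + 1) 1).map
            (fun i => ((PySem.List.pyRange 0 w 1).map (contribV n w (n / w) (n % w) num i)).sum)).sum = 0 := by
          apply sum_map_zero
          intro i hi
          obtain ⟨hi0, hi1⟩ := PySem.List.mem_pyRange_one.1 hi
          apply sum_map_zero
          intro j hj
          obtain ⟨hj0', hjw'⟩ := PySem.List.mem_pyRange_one.1 hj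
          unfold contribV
          by_cases hc : colV n w i j = num
          · rw [if_pos hc]
            set jj := if i % 2 = 0 then j else w - 1 - j with hjjd
            have hcol : colV n w i j = cellV n w i jj := by
              unfold colV; rw [hjjd]; split_ifs <;> rfl
            have hjjb : 0 ≤ jj ∧ jj < w := by rw [hjjd]; split_ifs <;> omega
            rw [hcol] at hc
            unfold cellV at hc
            have hiw : 0 ≤ i * w := mul_nonneg hi0 hw.le
            by_cases hle : i * w + jj + 1 ≤ n
            · rw [if_pos hle] at hc; omega
            · rw [if_neg hle] at hc
              have hiq : i = n / w := by
                by_contra hne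
                have h1' : i + 1 ≤ n / w := by omega
                have hm := mul_le_mul_of_nonneg_right h1' hw.le
                have e : (i + 1) * w = i * w + w := by ring
                omega
              rw [← hiq, ← hjjd]
              rw [hiq] at hle
              rw [if_neg (by omega)]
              omega
          · rw [if_neg hc]
        rw [hz]
        simp only [solution_alt]
        rw [if_pos (show w ≤ 0 ∨ num < 1 ∨ num > n by omega)]
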